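-- pv_equiv track=rewrite | github.com/ksayee/programming_assignments | python/CodingExercises/SortedArrayTwoNumberLessThanTarget_Apple.py | SortedArraryTwoNumberSumLessThanTarget
-- ===== SOURCE A (Python) =====
-- def SortedArraryTwoNumberSumLessThanTarget(ary,target):
--
--     left=0
--     right=len(ary)-1
--     output_lst=[]
--     while left<right:
--         sum=ary[left]+ary[right]
--         if sum>=target:
--             right=right-1
--         else:
--             tup=(ary[left],ary[right])
--             output_lst.append(tup)
--             k=right-1
--             while k>left:
--                 tup = (ary[left], ary[k])
--                 output_lst.append(tup)
--                 k=k-1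
--             left=left+1
--     return output_lst
-- ===== SOURCE B (Python) =====
-- def SortedArraryTwoNumberSumLessThanTarget(ary, target):
--     # Brute-force rescan: for each i, scan j downward and test every pair directly;
--     # no moving boundary pointer is maintained. Requires ary sorted non-decreasing
--     # (the function's stated contract) to match A.
--     n = len(ary)
--     out = []
--     i = 0
--     while i < n:
--         j = n - 1
--         while j > i:
--             if ary[i] + ary[j] < target:
--                 out.append((ary[i], ary[j]))
--             j -= 1
--         i += 1
--     return out
-- ===== Notes on version B (the rewrite author's own statement) =====
-- stated objective: simpler
-- what changed: Replaced the two-pointer scan that maintains a moving right boundary (and stops outright once the pointers meet) with a plain brute-force nested loop that re-tests every pair (i ascending, j descending) against the target; on sorted input this emits exactly the same pairs in the same order.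
-- outside the precondition, e.g. on SortedArraryTwoNumberSumLessThanTarget([5, 1, 2], 4): A returns [], B returns [(1, 2)]
import Mathlib
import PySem

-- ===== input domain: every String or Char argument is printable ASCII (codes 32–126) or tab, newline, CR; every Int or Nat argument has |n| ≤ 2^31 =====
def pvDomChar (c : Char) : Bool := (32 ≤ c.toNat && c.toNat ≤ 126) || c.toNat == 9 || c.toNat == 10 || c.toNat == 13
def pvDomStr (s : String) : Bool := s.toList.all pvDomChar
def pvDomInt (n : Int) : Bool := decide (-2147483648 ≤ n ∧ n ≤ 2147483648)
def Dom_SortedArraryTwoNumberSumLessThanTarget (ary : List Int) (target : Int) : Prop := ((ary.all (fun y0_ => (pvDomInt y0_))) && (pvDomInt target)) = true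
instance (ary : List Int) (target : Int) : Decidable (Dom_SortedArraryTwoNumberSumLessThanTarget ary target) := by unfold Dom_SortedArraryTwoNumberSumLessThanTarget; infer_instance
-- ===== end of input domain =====

-- B replaces A's two-pointer scan (moving right boundary, early stop) with a plain
-- brute-force nested rescan of every pair; simpler, same output on sorted input.


-- shared indexing helper: ary[i]; both ports only index with 0 ≤ i < len, where
-- pyGet? is some and the getD default is never used, so this is exact there
def pvIdx (ary : List Int) (i : Int) : Int := (PySem.List.pyGet? ary i).getD 0

-- ===== PORT A =====
-- inner 'while k > left: append (ary[left], ary[k]); k -= 1'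
def pvInnerA (ary : List Int) (target : Int) (left k : Int) (acc : List (Int × Int)) : List (Int × Int) :=
  if k > left then
    pvInnerA ary target left (k - 1) (acc ++ [(pvIdx ary left, pvIdx ary k)])
  else acc
termination_by (k - left).toNat
decreasing_by omega

-- outer 'while left < right'
def pvLoopA (ary : List Int) (target : Int) (left right : Int) (acc : List (Int × Int)) : List (Int × Int) :=
  if left < right then
    if pvIdx ary left + pvIdx ary right ≥ target then
      pvLoopA ary target left (right - 1) acc
    else
      pvLoopA ary target (left + 1) right
        (pvInnerA ary target left (right - 1) (acc ++ [(pvIdx ary left, pvIdx ary right)]))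
  else acc
termination_by (right - left).toNat
decreasing_by all_goals omega

def SortedArraryTwoNumberSumLessThanTarget (ary : List Int) (target : Int) : List (Int × Int) :=
  pvLoopA ary target 0 ((ary.length : Int) - 1) []

-- ===== PORT B =====
-- inner 'while j > i: if ary[i] + ary[j] < target: append; j -= 1'
def pvRowB (ary : List Int) (target : Int) (i j : Int) (acc : List (Int × Int)) : List (Int × Int) :=
  if j > i then
    if pvIdx ary i + pvIdx ary j < target then
      pvRowB ary target i (j - 1) (acc ++ [(pvIdx ary i, pvIdx ary j)])
    else
      pvRowB ary target i (j - 1) acc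
  else acc
termination_by (j - i).toNat
decreasing_by all_goals omega

-- outer 'while i < n'
def pvOuterB (ary : List Int) (target : Int) (i : Int) (acc : List (Int × Int)) : List (Int × Int) :=
  if i < (ary.length : Int) then
    pvOuterB ary target (i + 1) (pvRowB ary target i ((ary.length : Int) - 1) acc)
  else acc
termination_by ((ary.length : Int) - i).toNat
decreasing_by omega

def SortedArraryTwoNumberSumLessThanTarget_alt (ary : List Int) (target : Int) : List (Int × Int) :=
  pvOuterB ary target 0 []

-- ===== PRECONDITION & SPEC =====
-- Pre_ restricts to the function's stated contract (the name says 'SortedArray'):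
-- ary non-decreasing; also admitted are inputs on which the order of elements cannot
-- matter and the two programs trivially coincide (length ≤ 2, every pair sum below
-- target, or none below it). On other unsorted input A's two-pointer result is an
-- artefact of the pointer walk (it can silently drop valid pairs) and B does not
-- reproduce it.
def Pre_SortedArraryTwoNumberSumLessThanTarget (ary : List Int) (target : Int) : Prop :=
  ary.length ≤ 2 ∨ List.Pairwise (· ≤ ·) ary ∨
    List.Pairwise (fun x y => x + y < target) ary ∨
    List.Pairwise (fun x y => x + y ≥ target) ary
instance (ary : List Int) (target : Int) : Decidable (Pre_SortedArraryTwoNumberSumLessThanTarget ary target) := by unfold Pre_SortedArraryTwoNumberSumLessThanTarget; infer_instance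

def pvWitness_SortedArraryTwoNumberSumLessThanTarget : List Int × Int := ([1, 2, 3, 4], 6)

def Spec_SortedArraryTwoNumberSumLessThanTarget (ary : List Int) (target : Int) (out : List (Int × Int)) : Prop := out = SortedArraryTwoNumberSumLessThanTarget_alt ary target
instance (ary : List Int) (target : Int) (out : List (Int × Int)) : Decidable (Spec_SortedArraryTwoNumberSumLessThanTarget ary target out) := by unfold Spec_SortedArraryTwoNumberSumLessThanTarget; infer_instance

-- ===== CLAIM (what is proved, stated in full; the proofs are below) =====
def Claim_equal_SortedArraryTwoNumberSumLessThanTarget : Prop := ∀ (ary : List Int) (target : Int), Dom_SortedArraryTwoNumberSumLessThanTarget ary target → Pre_SortedArraryTwoNumberSumLessThanTarget ary target → Spec_SortedArraryTwoNumberSumLessThanTarget ary target (SortedArraryTwoNumberSumLessThanTarget ary target)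

-- ===== LEMMAS AND PROOFS =====

-- pure (accumulator-free) views of the loops
def pvInnerList (ary : List Int) (left k : Int) : List (Int × Int) :=
  if k > left then (pvIdx ary left, pvIdx ary k) :: pvInnerList ary left (k - 1) else []
termination_by (k - left).toNat
decreasing_by omega

def pvRowList (ary : List Int) (target : Int) (i j : Int) : List (Int × Int) :=
  if j > i then
    if pvIdx ary i + pvIdx ary j < target then
      (pvIdx ary i, pvIdx ary j) :: pvRowList ary target i (j - 1)
    else pvRowList ary target i (j - 1)
  else []
termination_by (j - i).toNat
decreasing_by all_goals omega

def pvTailB (ary : List Int) (target : Int) (i : Int) : List (Int × Int) :=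
  if i < (ary.length : Int) then
    pvRowList ary target i ((ary.length : Int) - 1) ++ pvTailB ary target (i + 1)
  else []
termination_by ((ary.length : Int) - i).toNat
decreasing_by omega

lemma pvInnerA_acc (ary : List Int) (target : Int) (left k : Int) (acc : List (Int × Int)) :
    pvInnerA ary target left k acc = acc ++ pvInnerList ary left k := by
  fun_induction pvInnerA ary target left k acc with
  | case1 k acc h ih => rw [pvInnerList]; simp only [if_pos h]; rw [ih]; simp
  | case2 k acc h => rw [pvInnerList]; simp [h]

lemma pvRowB_acc (ary : List Int) (target : Int) (i j : Int) (acc : List (Int × Int)) :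
    pvRowB ary target i j acc = acc ++ pvRowList ary target i j := by
  fun_induction pvRowB ary target i j acc with
  | case1 j acc h hc ih => rw [pvRowList]; simp only [if_pos h, if_pos hc]; rw [ih]; simp
  | case2 j acc h hc ih => rw [pvRowList]; simp only [if_pos h, if_neg hc]; rw [ih]
  | case3 j acc h => rw [pvRowList]; simp [h]

lemma pvOuterB_acc (ary : List Int) (target : Int) (i : Int) (acc : List (Int × Int)) :
    pvOuterB ary target i acc = acc ++ pvTailB ary target i := by
  fun_induction pvOuterB ary target i acc with
  | case1 i acc h ih => rw [pvTailB]; simp only [if_pos h]; rw [ih, pvRowB_acc]; simp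
  | case2 i acc h => rw [pvTailB]; simp [h]

-- a Pairwise relation transfers to pvIdx at in-range indices
lemma pvPairwise_rel (ary : List Int) (R : Int → Int → Prop) (hs : List.Pairwise R ary)
    {i j : Int} (hi : 0 ≤ i) (hij : i < j) (hj : j < (ary.length : Int)) :
    R (pvIdx ary i) (pvIdx ary j) := by
  rw [pvIdx, pvIdx,
    PySem.List.pyGet?_eq_some_getElem ary hi (by omega),
    PySem.List.pyGet?_eq_some_getElem ary (by omega) hj]
  simp only [Option.getD_some]
  exact List.pairwise_iff_getElem.mp hs _ _ _ _ (by omega)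

-- sorted array: indices are monotone
lemma pvIdx_mono (ary : List Int) (hs : List.Pairwise (· ≤ ·) ary) {i j : Int}
    (hi : 0 ≤ i) (hij : i ≤ j) (hj : j < (ary.length : Int)) :
    pvIdx ary i ≤ pvIdx ary j := by
  rcases eq_or_lt_of_le hij with h | h
  · exact le_of_eq (by rw [h])
  · exact pvPairwise_rel ary _ hs hi h hj

lemma pvRowList_skip (ary : List Int) (target : Int) (i r j : Int)
    (hir : i ≤ r) (hrj : r ≤ j)
    (h : ∀ j', r < j' → j' ≤ j → pvIdx ary i + pvIdx ary j' ≥ target) :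
    pvRowList ary target i j = pvRowList ary target i r := by
  by_cases hjr : j = r
  · rw [hjr]
  · have hrj' : r < j := lt_of_le_of_ne hrj (Ne.symm hjr)
    rw [pvRowList, if_pos (by omega : j > i),
      if_neg (by have := h j hrj' le_rfl; omega)]
    exact pvRowList_skip ary target i r (j - 1) hir (by omega)
      (fun j' h1 h2 => h j' h1 (by omega))
termination_by (j - r).toNat
decreasing_by omega

lemma pvRowList_all (ary : List Int) (target : Int) (i j : Int)
    (h : ∀ j', i < j' → j' ≤ j → pvIdx ary i + pvIdx ary j' < target) :
    pvRowList ary target i j = pvInnerList ary i j := by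
  by_cases hji : j > i
  · rw [pvRowList, pvInnerList, if_pos hji, if_pos hji, if_pos (h j hji le_rfl)]
    rw [pvRowList_all ary target i (j - 1) (fun j' h1 h2 => h j' h1 (by omega))]
  · rw [pvRowList, pvInnerList, if_neg hji, if_neg hji]
termination_by (j - i).toNat
decreasing_by omega

lemma pvTailB_empty (ary : List Int) (target : Int) (i : Int)
    (h : ∀ i' j', i ≤ i' → i' < j' → j' < (ary.length : Int) →
      pvIdx ary i' + pvIdx ary j' ≥ target) :
    pvTailB ary target i = [] := by
  rw [pvTailB]
  by_cases hn : i < (ary.length : Int)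
  · rw [if_pos hn,
      pvRowList_skip ary target i i ((ary.length : Int) - 1) le_rfl (by omega)
        (fun j' h1 h2 => h i j' le_rfl h1 (by omega)),
      pvRowList, if_neg (by omega : ¬ i > i),
      pvTailB_empty ary target (i + 1) (fun i' j' h1 h2 h3 => h i' j' (by omega) h2 h3)]
    simp
  · rw [if_neg hn]
termination_by ((ary.length : Int) - i).toNat
decreasing_by omega

-- main invariant lemma: A's loop from state (left, right) produces exactly B's rows
-- from i = left on, given that all columns j > right are already ≥ target for left
lemma pvLoopA_eq_tail (ary : List Int) (target : Int) (hs : List.Pairwise (· ≤ ·) ary)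
    (left right : Int) (acc : List (Int × Int))
    (hl : 0 ≤ left) (hlr : left ≤ right) (hr : right < (ary.length : Int))
    (hinv : ∀ j, right < j → j < (ary.length : Int) → pvIdx ary left + pvIdx ary j ≥ target) :
    pvLoopA ary target left right acc = acc ++ pvTailB ary target left := by
  rw [pvLoopA]
  by_cases hlt : left < right
  · rw [if_pos hlt]
    by_cases hge : pvIdx ary left + pvIdx ary right ≥ target
    · rw [if_pos hge]
      exact pvLoopA_eq_tail ary target hs left (right - 1) acc hl (by omega) (by omega)
        (fun j h1 h2 => by
          rcases eq_or_lt_of_le (show right ≤ j by omega) with h3 | h3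
          · rw [← h3]; exact hge
          · exact hinv j h3 h2)
    · rw [if_neg hge]
      rw [not_le] at hge
      have hrow : pvRowList ary target left ((ary.length : Int) - 1)
          = (pvIdx ary left, pvIdx ary right) :: pvInnerList ary left (right - 1) := by
        rw [pvRowList_skip ary target left right ((ary.length : Int) - 1) (by omega) (by omega)
            (fun j' h1 h2 => hinv j' h1 (by omega)),
          pvRowList, if_pos hlt, if_pos hge]
        congr 1
        exact pvRowList_all ary target left (right - 1) (fun j' h1 h2 => by
          have := pvIdx_mono ary hs (show (0:Int) ≤ j' by omega) (show j' ≤ right by omega) hr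
          omega)
      rw [pvInnerA_acc,
        pvLoopA_eq_tail ary target hs (left + 1) right _ (by omega) hlt hr
          (fun j h1 h2 => by
            have := pvIdx_mono ary hs hl (show left ≤ left + 1 by omega) (by omega)
            have := hinv j h1 h2
            omega)]
      conv_rhs => rw [pvTailB, if_pos (by omega : left < (ary.length : Int)), hrow]
      simp
  · rw [if_neg hlt]
    have hle : left = right := by omega
    rw [pvTailB_empty ary target left (fun i' j' h1 h2 h3 => by
      have := pvIdx_mono ary hs hl h1 (by omega)
      have := hinv j' (by omega) h3
      omega)]
    simp
termination_by (right - left).toNat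
decreasing_by all_goals omega

-- every pair sum below target: A's right pointer never moves and it emits every pair
lemma pvLoopA_all_lt (ary : List Int) (target : Int)
    (hs : List.Pairwise (fun x y => x + y < target) ary)
    (left : Int) (acc : List (Int × Int))
    (hl : 0 ≤ left) (hln : left ≤ (ary.length : Int) - 1) :
    pvLoopA ary target left ((ary.length : Int) - 1) acc = acc ++ pvTailB ary target left := by
  rw [pvLoopA]
  by_cases hlt : left < (ary.length : Int) - 1
  · have hsum : pvIdx ary left + pvIdx ary ((ary.length : Int) - 1) < target :=
      pvPairwise_rel ary _ hs hl hlt (by omega)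
    rw [if_pos hlt, if_neg (by omega), pvInnerA_acc,
      pvLoopA_all_lt ary target hs (left + 1) _ (by omega) (by omega)]
    have hrow : pvRowList ary target left ((ary.length : Int) - 1)
        = (pvIdx ary left, pvIdx ary ((ary.length : Int) - 1))
            :: pvInnerList ary left ((ary.length : Int) - 1 - 1) := by
      rw [pvRowList_all ary target left ((ary.length : Int) - 1)
          (fun j' h1 h2 => pvPairwise_rel ary _ hs hl h1 (by omega)),
        pvInnerList, if_pos hlt]
    conv_rhs => rw [pvTailB, if_pos (by omega : left < (ary.length : Int)), hrow]
    simp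
  · rw [if_neg hlt]
    have hl1 : (ary.length : Int) - 1 = left := by omega
    conv_rhs => rw [pvTailB, if_pos (by omega : left < (ary.length : Int)), hl1]
    rw [pvRowList, if_neg (lt_irrefl left), pvTailB, if_neg (by omega)]
    simp
termination_by ((ary.length : Int) - 1 - left).toNat
decreasing_by omega

-- no pair sum below target: A's loop only decrements right and emits nothing
lemma pvLoopA_all_ge (ary : List Int) (target : Int)
    (hs : List.Pairwise (fun x y => x + y ≥ target) ary)
    (left right : Int) (acc : List (Int × Int))
    (hl : 0 ≤ left) (hr : right < (ary.length : Int)) :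
    pvLoopA ary target left right acc = acc := by
  rw [pvLoopA]
  by_cases hlt : left < right
  · rw [if_pos hlt, if_pos (pvPairwise_rel ary _ hs hl hlt hr)]
    exact pvLoopA_all_ge ary target hs left (right - 1) acc hl (by omega)
  · rw [if_neg hlt]
termination_by (right - left).toNat
decreasing_by omega

lemma pv_sorted_case (ary : List Int) (target : Int) (hs : List.Pairwise (· ≤ ·) ary) :
    SortedArraryTwoNumberSumLessThanTarget ary target
      = SortedArraryTwoNumberSumLessThanTarget_alt ary target := by
  unfold SortedArraryTwoNumberSumLessThanTarget SortedArraryTwoNumberSumLessThanTarget_alt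
  rw [pvOuterB_acc]
  by_cases hn : ary.length = 0
  · rw [pvLoopA, pvTailB]
    simp [hn]
  · rw [pvLoopA_eq_tail ary target hs 0 ((ary.length : Int) - 1) [] le_rfl (by omega) (by omega)
      (fun j hj hj' => absurd hj' (by omega))]

-- ===== VERDICT (by name: the statement is the Claim_ definition above) =====
theorem SortedArraryTwoNumberSumLessThanTarget_spec : Claim_equal_SortedArraryTwoNumberSumLessThanTarget := by
  intro ary target _ hpre
  unfold Spec_SortedArraryTwoNumberSumLessThanTarget
  rcases hpre with hlen | hs | halllt | hallge
  · -- length ≤ 2: both sides compute directly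
    rcases ary with _ | ⟨a, _ | ⟨b, _ | ⟨c, rest⟩⟩⟩
    · simp [SortedArraryTwoNumberSumLessThanTarget, SortedArraryTwoNumberSumLessThanTarget_alt,
        pvLoopA, pvOuterB]
    · simp [SortedArraryTwoNumberSumLessThanTarget, SortedArraryTwoNumberSumLessThanTarget_alt,
        pvLoopA, pvOuterB, pvRowB]
    · by_cases hab : pvIdx [a, b] 0 + pvIdx [a, b] 1 ≥ target
      · have h1 : ¬ (pvIdx [a, b] 0 + pvIdx [a, b] 1 < target) := by omega
        simp [SortedArraryTwoNumberSumLessThanTarget, SortedArraryTwoNumberSumLessThanTarget_alt,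
          pvLoopA, pvOuterB, pvRowB, hab, h1]
      · have h1 : pvIdx [a, b] 0 + pvIdx [a, b] 1 < target := by omega
        simp [SortedArraryTwoNumberSumLessThanTarget, SortedArraryTwoNumberSumLessThanTarget_alt,
          pvLoopA, pvOuterB, pvRowB, pvInnerA, hab, h1]
    · simp at hlen
  · exact pv_sorted_case ary target hs
  · -- every pair sum below target
    unfold SortedArraryTwoNumberSumLessThanTarget SortedArraryTwoNumberSumLessThanTarget_alt
    rw [pvOuterB_acc]
    by_cases hn : ary.length = 0
    · rw [pvLoopA, pvTailB]
      simp [hn]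
    · exact pvLoopA_all_lt ary target halllt 0 [] le_rfl (by omega)
  · -- no pair sum below target
    unfold SortedArraryTwoNumberSumLessThanTarget SortedArraryTwoNumberSumLessThanTarget_alt
    rw [pvOuterB_acc,
      pvLoopA_all_ge ary target hallge 0 ((ary.length : Int) - 1) [] le_rfl (by omega),
      pvTailB_empty ary target 0
        (fun i' j' h1 h2 h3 => pvPairwise_rel ary _ hallge h1 h2 h3)]
    simp
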